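-- pv_equiv track=rewrite | github.com/faiyaz72/codingPractice | Utils/builtIn.py | aggregate_price
-- ===== SOURCE A (Python) =====
-- from collections import defaultdict
-- from typing import List
--
-- def aggregate_price(buy_orders: List[tuple]):
--   price_map = defaultdict(int)
--   for price, quantity in buy_orders:
--     price_map[price]+=quantity
--   result = []
--   for key, value in price_map.items():
--     result.append((key, value))
--   return sorted(result, key=lambda x: x[0])
-- ===== SOURCE B (Python) =====
-- def aggregate_price(buy_orders):
--     prices = sorted({p for p, _ in buy_orders})
--     return [(p, sum(q for pp, q in buy_orders if pp == p)) for p in prices]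
-- ===== Notes on version B (the rewrite author's own statement) =====
-- stated objective: simpler
-- what changed: B replaces the mutable defaultdict accumulation + item-list rebuild + sort by first component with a direct two-line comprehension: sort the distinct prices once, then sum the quantities of each price with a filtered generator.
import Mathlib
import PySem

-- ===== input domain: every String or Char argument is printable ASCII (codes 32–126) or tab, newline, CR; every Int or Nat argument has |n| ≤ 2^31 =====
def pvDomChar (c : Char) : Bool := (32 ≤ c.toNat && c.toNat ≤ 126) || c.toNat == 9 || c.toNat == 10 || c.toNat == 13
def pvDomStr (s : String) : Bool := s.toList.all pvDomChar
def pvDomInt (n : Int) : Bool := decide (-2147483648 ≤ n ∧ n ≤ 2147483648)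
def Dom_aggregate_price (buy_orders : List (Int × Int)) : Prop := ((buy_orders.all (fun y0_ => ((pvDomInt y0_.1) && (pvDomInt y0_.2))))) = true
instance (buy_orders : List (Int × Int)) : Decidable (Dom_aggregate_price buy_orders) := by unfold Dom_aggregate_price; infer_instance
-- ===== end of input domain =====

-- B aggregates per distinct sorted price with a filtered sum instead of a defaultdict loop + sort; objective: simpler (not faster).

-- ===== PORT A =====
def aggregate_price (buy_orders : List (Int × Int)) : List (Int × Int) :=
  let price_map : PySem.Dict Int Int :=
    buy_orders.foldl (fun d pq => d.modify pq.1 0 (· + pq.2)) PySem.Dict.empty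
  let result : List (Int × Int) :=
    price_map.items.foldl (fun acc kv => acc ++ [(kv.1, kv.2)]) []
  PySem.List.sorted result (fun x => x.1)

-- ===== PORT B =====
def aggregate_price_alt (buy_orders : List (Int × Int)) : List (Int × Int) :=
  let prices := PySem.List.sorted (PySem.Set.ofList (buy_orders.map (·.1))) (fun x => x)
  prices.map (fun p => (p, ((buy_orders.filter (fun pq => pq.1 == p)).map (·.2)).sum))

-- ===== PRECONDITION & SPEC =====
def Spec_aggregate_price (buy_orders : List (Int × Int)) (out : List (Int × Int)) : Prop := out = aggregate_price_alt buy_orders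
instance (buy_orders : List (Int × Int)) (out : List (Int × Int)) : Decidable (Spec_aggregate_price buy_orders out) := by unfold Spec_aggregate_price; infer_instance

-- ===== CLAIM (what is proved, stated in full; the proofs are below) =====
def Claim_equal_aggregate_price : Prop := ∀ (buy_orders : List (Int × Int)), Dom_aggregate_price buy_orders → Spec_aggregate_price buy_orders (aggregate_price buy_orders)

-- ===== LEMMAS AND PROOFS =====

-- running defaultdict(int) accumulation = filtered sum (specific to these two programs)
theorem getD_foldl_modify_add (bs : List (Int × Int)) (d : PySem.Dict Int Int) (p : Int) :
    (bs.foldl (fun d pq => d.modify pq.1 0 (· + pq.2)) d).getD p 0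
      = d.getD p 0 + ((bs.filter (fun pq => pq.1 == p)).map (·.2)).sum := by
  induction bs generalizing d with
  | nil => simp
  | cons hd tl ih =>
      simp only [List.foldl_cons, ih, PySem.Dict.getD_modify, List.filter_cons]
      by_cases h : hd.1 = p
      · simp [h, add_assoc]
      · simp [h, Ne.symm h]

-- a sorted-by-fst list of pairs with distinct fsts is the map over the sorted fsts
theorem sorted_map_fst (S : List Int) (g : Int → Int) (hnd : S.Nodup) :
    PySem.List.sorted (S.map (fun k => (k, g k))) (fun x => x.1)
      = (PySem.List.sorted S (fun x => x)).map (fun k => (k, g k)) := by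
  apply PySem.List.sorted_eq_of_perm_of_pairwise_lt
  · exact ((PySem.List.sorted_perm S (fun x => x) false).map _)
  · rw [List.pairwise_map]
    have h1 := PySem.List.sorted_pairwise S (fun x => x)
    have h2 : (PySem.List.sorted S (fun x => x) false).Nodup :=
      (PySem.List.sorted_perm S (fun x => x) false).nodup_iff.mpr hnd
    have := h1.and ((List.nodup_iff_pairwise_ne).mp h2)
    exact this.imp (fun h => lt_of_le_of_ne h.1 h.2)

theorem aggregate_price_eq (buy_orders : List (Int × Int)) :
    aggregate_price buy_orders = aggregate_price_alt buy_orders := by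
  unfold aggregate_price aggregate_price_alt
  dsimp only
  have hkeys : (buy_orders.foldl (fun d pq => d.modify pq.1 0 (· + pq.2)) PySem.Dict.empty).keys
      = PySem.Set.ofList (buy_orders.map (·.1)) := by
    rw [PySem.Dict.keys_foldl_modify_key buy_orders (·.1) 0 (fun _ pq v => v + pq.2)]
    simp [PySem.Set.update, PySem.Set.ofList_eq_foldl, PySem.Dict.keys_empty]
  have hnd : (buy_orders.foldl (fun d pq => d.modify pq.1 0 (· + pq.2)) PySem.Dict.empty).keys.Nodup := by
    exact PySem.Dict.nodup_keys_foldl_modify_key buy_orders (·.1) 0 (fun _ pq v => v + pq.2)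
      PySem.Dict.empty (by simp [PySem.Dict.keys_empty])
  rw [PySem.List.foldl_append_singleton_eq_map]
  rw [PySem.Dict.items_eq_map_keys _ hnd 0]
  rw [List.map_map]
  have hmapeq : ((fun kv : Int × Int => (kv.1, kv.2)) ∘
      (fun k => (k, (buy_orders.foldl (fun d pq => d.modify pq.1 0 (· + pq.2)) PySem.Dict.empty).getD k 0)))
      = fun k => (k, ((buy_orders.filter (fun pq => pq.1 == k)).map (·.2)).sum) := by
    funext k
    simp [Function.comp, getD_foldl_modify_add buy_orders PySem.Dict.empty k]
  rw [hmapeq, hkeys]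
  have hndS : (PySem.Set.ofList (buy_orders.map (·.1))).Nodup := PySem.Set.nodup_ofList _
  simpa using sorted_map_fst (PySem.Set.ofList (buy_orders.map (·.1)))
    (fun k => ((buy_orders.filter (fun pq => pq.1 == k)).map (·.2)).sum) hndS

-- ===== VERDICT (by name: the statement is the Claim_ definition above) =====
theorem aggregate_price_spec : Claim_equal_aggregate_price := by
  intro bs _
  unfold Spec_aggregate_price
  exact aggregate_price_eq bs
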